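-- pv_equiv track=rewrite | github.com/Populustremuloides/DataTiger2 | Database.py | validSortChem
-- ===== SOURCE A (Python) =====
-- def validSortChem(sortChem):
--     numberDetected = False
--     colonDetected = False
--     spaceDetected = False
--     slashDetected = False
--
--     for c in sortChem:
--         if c.isnumeric():
--             numberDetected = True
--         if c == ":":
--             colonDetected = True
--         if c == "/":
--             slashDetected = True
--
--
--     if numberDetected and not colonDetected and not spaceDetected and not slashDetected:
--         if "ppm" in sortChem.lower():
--             return False
--         if "mg" in sortChem.lower():
--             return False
--         if "blank" in sortChem.lower():
--             return False
--         if "std" in sortChem.lower():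
--             return False
--         return True
--     else:
--         return False
-- ===== SOURCE B (Python) =====
-- def validSortChem(sortChem):
--     # Single streaming pass: a sliding 5-char lowercase window detects the banned
--     # words as they complete, with early exit on ':' or '/'; no whole-string
--     # substring scans and no flag bookkeeping after the loop.
--     BANNED = ("ppm", "mg", "blank", "std")
--     has_digit = False
--     window = ""
--     for ch in sortChem:
--         if ch == ":" or ch == "/":
--             return False
--         if ch.isnumeric():
--             has_digit = True
--         window = (window + ch.lower())[-5:]
--         if any(window.endswith(w) for w in BANNED):
--             return False
--     return has_digit
-- ===== Notes on version B (the rewrite author's own statement) =====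
-- stated objective: alternative
-- what changed: Replaced A's flag-accumulating loop followed by four whole-string lowercased substring tests by a single streaming pass: a sliding 5-character lowercase window detects the banned words ('ppm','mg','blank','std') as they complete, with early exit on ':' or '/', so no substring search over the full string is ever performed.
import Mathlib
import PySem

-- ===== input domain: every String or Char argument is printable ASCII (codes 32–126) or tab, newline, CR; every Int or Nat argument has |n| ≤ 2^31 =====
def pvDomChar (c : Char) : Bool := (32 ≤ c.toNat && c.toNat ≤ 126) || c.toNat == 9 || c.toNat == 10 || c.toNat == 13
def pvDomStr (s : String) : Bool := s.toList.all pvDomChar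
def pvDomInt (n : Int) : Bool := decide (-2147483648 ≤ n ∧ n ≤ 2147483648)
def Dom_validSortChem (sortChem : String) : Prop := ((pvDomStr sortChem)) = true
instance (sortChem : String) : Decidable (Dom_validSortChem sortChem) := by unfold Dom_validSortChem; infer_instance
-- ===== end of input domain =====

-- B replaces A's flag loop + whole-string substring tests by ONE streaming pass with a
-- sliding 5-char lowercase window and early exits (same asymptotic cost; objective: alternative).

-- ===== PORT A =====
-- Port of A: one fold over the characters accumulating the four flags, then the branch chain.
-- c.isnumeric() is ported as PySem.Chars.isdigit c: exact on the ASCII domain Dom_ admits.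
def validSortChem (sortChem : String) : Bool :=
  let st := sortChem.toList.foldl
    (fun (acc : Bool × Bool × Bool × Bool) c =>
      (acc.1 || PySem.Chars.isdigit c,
       acc.2.1 || (c == ':'),
       acc.2.2.1,
       acc.2.2.2 || (c == '/')))
    (false, false, false, false)
  if st.1 && !st.2.1 && !st.2.2.1 && !st.2.2.2 then
    if PySem.Str.isIn "ppm" (PySem.Str.lower sortChem) then false
    else if PySem.Str.isIn "mg" (PySem.Str.lower sortChem) then false
    else if PySem.Str.isIn "blank" (PySem.Str.lower sortChem) then false
    else if PySem.Str.isIn "std" (PySem.Str.lower sortChem) then false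
    else true
  else false

-- ===== PORT B =====
-- Port of Source B: the tuple BANNED, as lists of chars.
def pvBanned : List (List Char) := [['p','p','m'], ['m','g'], ['b','l','a','n','k'], ['s','t','d']]

-- the loop body of Source B: early returns become the recursion stopping with false;
-- '(window + ch.lower())[-5:]' is the slice primitive; ch.lower() of one ASCII char is lowerChar.
def pvAltLoop : List Char → Bool → List Char → Bool
  | [], hasDigit, _ => hasDigit
  | c :: rest, hasDigit, window =>
    if c == ':' || c == '/' then false
    else
      let hasDigit' := hasDigit || PySem.Chars.isdigit c
      let window' := PySem.List.slice (window ++ [PySem.Chars.lowerChar c]) (some (-5)) none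
      if pvBanned.any (fun w => PySem.Chars.endswith window' w) then false
      else pvAltLoop rest hasDigit' window'

def validSortChem_alt (sortChem : String) : Bool :=
  pvAltLoop sortChem.toList false []

-- ===== PRECONDITION & SPEC =====
def Spec_validSortChem (sortChem : String) (out : Bool) : Prop := out = validSortChem_alt sortChem
instance (sortChem : String) (out : Bool) : Decidable (Spec_validSortChem sortChem out) := by unfold Spec_validSortChem; infer_instance

-- ===== CLAIM =====
def Claim_equal_validSortChem : Prop := ∀ (sortChem : String), Dom_validSortChem sortChem → Spec_validSortChem sortChem (validSortChem sortChem)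

-- ===== LEMMAS AND PROOFS =====

-- the last-five-characters window
def pvLastN (l : List Char) : List Char := l.drop (l.length - 5)

-- "some banned word occurs in l" as a boolean
def pvBannedIn (l : List Char) : Bool := pvBanned.any (fun w => PySem.Chars.isIn w l)

-- the [-5:] slice is 'drop (length - 5)'
theorem pv_slice_lastN (l : List Char) :
    PySem.List.slice l (some (-5)) none = pvLastN l := by
  simp [PySem.List.slice, pvLastN]

-- pushing one char onto the window keeps it the last five of the whole processed list
theorem pv_window_push (p : List Char) (c : Char) :
    PySem.List.slice (pvLastN p ++ [c]) (some (-5)) none = pvLastN (p ++ [c]) := by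
  rw [pv_slice_lastN]
  unfold pvLastN
  rw [List.drop_append_of_le_length (by simp), List.drop_drop]
  rw [show p.length - 5 + ((p.drop (p.length - 5) ++ [c]).length - 5) = (p ++ [c]).length - 5 by
        simp; omega]
  rw [List.drop_append_of_le_length (by simp)]

-- a word of length ≤ 5 is a suffix of l iff it is a suffix of the last-five window
theorem pv_suffix_lastN (w l : List Char) (hw : w.length ≤ 5) :
    w <:+ pvLastN l ↔ w <:+ l := by
  constructor
  · intro h
    exact h.trans (List.drop_suffix _ _)
  · rintro ⟨t, rfl⟩
    unfold pvLastN
    refine ⟨t.drop (( t ++ w).length - 5), ?_⟩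
    rw [List.drop_append_of_le_length (by simp; omega)]

-- a new occurrence of a banned word in p ++ [c] either was already in p or ends at c
theorem pv_infix_concat (q p : List Char) (c : Char) :
    q <:+: p ++ [c] ↔ q <:+: p ∨ q <:+ p ++ [c] := by
  constructor
  · rintro ⟨s, t, h⟩
    cases t using List.reverseRecOn with
    | nil => exact Or.inr ⟨s, by simpa using h⟩
    | append_singleton t' c₀ _ =>
      rw [show s ++ q ++ (t' ++ [c₀]) = (s ++ q ++ t') ++ [c₀] by simp] at h
      exact Or.inl ⟨s, t', (List.append_singleton_inj.mp h).1⟩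
  · rintro (h | h)
    · exact h.trans ⟨[], [c], by simp⟩
    · exact h.isInfix

-- the step form of the occurrence check: bannedIn (p ++ [c]) = bannedIn p || window hit
theorem pv_bannedIn_step (p : List Char) (c : Char) :
    pvBannedIn (p ++ [c]) =
      (pvBannedIn p || pvBanned.any (fun w => PySem.Chars.endswith (pvLastN (p ++ [c])) w)) := by
  unfold pvBannedIn
  rw [Bool.eq_iff_iff]
  simp only [List.any_eq_true, Bool.or_eq_true, PySem.Chars.isIn_iff_infix,
    PySem.Chars.endswith_iff]
  constructor
  · rintro ⟨w, hw, hinf⟩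
    rcases (pv_infix_concat w p c).mp hinf with h | h
    · exact Or.inl ⟨w, hw, h⟩
    · refine Or.inr ⟨w, hw, (pv_suffix_lastN w _ ?_).mpr h⟩
      have : ∀ w ∈ pvBanned, w.length ≤ 5 := by decide
      exact this w hw
  · rintro (⟨w, hw, h⟩ | ⟨w, hw, h⟩)
    · exact ⟨w, hw, (pv_infix_concat w p c).mpr (Or.inl h)⟩
    · refine ⟨w, hw, (pv_infix_concat w p c).mpr (Or.inr ((pv_suffix_lastN w _ ?_).mp h))⟩
      have : ∀ w ∈ pvBanned, w.length ≤ 5 := by decide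
      exact this w hw

theorem pv_bannedIn_append_right (l t : List Char) (h : pvBannedIn l = true) :
    pvBannedIn (l ++ t) = true := by
  unfold pvBannedIn at *
  simp only [List.any_eq_true, PySem.Chars.isIn_iff_infix] at *
  obtain ⟨w, hw, hi⟩ := h
  exact ⟨w, hw, hi.trans ⟨[], t, by simp⟩⟩

-- B's loop, started with window = last five of an occurrence-free processed prefix lp,
-- computes the three scans and the occurrence test over the whole lowered string.
theorem pv_altLoop_eq (l : List Char) (hd : Bool) (lp : List Char)
    (hlp : pvBannedIn lp = false) :
    pvAltLoop l hd (pvLastN lp) =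
      (!(l.any (fun c => c == ':' || c == '/')) &&
       (hd || l.any (fun c => PySem.Chars.isdigit c)) &&
       !(pvBannedIn (lp ++ l.map PySem.Chars.lowerChar))) := by
  induction l generalizing hd lp with
  | nil => simp [pvAltLoop, hlp]
  | cons c rest ih =>
    rw [pvAltLoop]
    by_cases hc : (c == ':' || c == '/') = true
    · simp [hc]
    · rw [if_neg (by simp_all)]
      rw [pv_window_push]
      by_cases hbad :
          (pvBanned.any fun w => PySem.Chars.endswith (pvLastN (lp ++ [PySem.Chars.lowerChar c])) w) = true
      · rw [if_pos hbad]
        have h1 : pvBannedIn (lp ++ [PySem.Chars.lowerChar c]) = true := by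
          rw [pv_bannedIn_step, hbad, Bool.or_true]
        have h2 : pvBannedIn (lp ++ PySem.Chars.lowerChar c :: rest.map PySem.Chars.lowerChar)
            = true := by
          rw [show lp ++ (PySem.Chars.lowerChar c :: rest.map PySem.Chars.lowerChar)
              = (lp ++ [PySem.Chars.lowerChar c]) ++ rest.map PySem.Chars.lowerChar by simp]
          exact pv_bannedIn_append_right _ _ h1
        simp [h2]
      · rw [if_neg hbad]
        have hlp' : pvBannedIn (lp ++ [PySem.Chars.lowerChar c]) = false := by
          rw [pv_bannedIn_step, hlp, Bool.false_or]
          exact Bool.not_eq_true _ ▸ (by simpa using hbad)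
        rw [ih _ _ hlp']
        rw [List.map_cons, show lp ++ (PySem.Chars.lowerChar c :: rest.map PySem.Chars.lowerChar)
            = (lp ++ [PySem.Chars.lowerChar c]) ++ rest.map PySem.Chars.lowerChar by simp]
        simp only [List.any_cons]
        rw [show (c == ':' || c == '/') = false by simpa using hc]
        simp [Bool.or_assoc]

-- A's flag fold computes the three 'any' scans (space flag stays false).
theorem pv_fold_eq (l : List Char) (a b sp d : Bool) :
    l.foldl
      (fun (acc : Bool × Bool × Bool × Bool) c =>
        (acc.1 || PySem.Chars.isdigit c,
         acc.2.1 || (c == ':'),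
         acc.2.2.1,
         acc.2.2.2 || (c == '/')))
      (a, b, sp, d)
    = (a || l.any (fun c => PySem.Chars.isdigit c),
       b || l.any (fun c => c == ':'),
       sp,
       d || l.any (fun c => c == '/')) := by
  induction l generalizing a b sp d with
  | nil => simp
  | cons x xs ih => simp [List.foldl_cons, ih, Bool.or_assoc]

-- a fused scan for two characters is the disjunction of the two scans
theorem pv_any_or (l : List Char) (p q : Char → Bool) :
    l.any (fun c => p c || q c) = (l.any p || l.any q) := by
  induction l with
  | nil => simp
  | cons x xs ih => simp [ih]; cases p x <;> cases q x <;> simp [Bool.or_comm]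

-- A's four substring tests are exactly pvBannedIn of the lowered character list
theorem pv_bannedIn_lower (s : String) :
    pvBannedIn (s.toList.map PySem.Chars.lowerChar) =
      (PySem.Str.isIn "ppm" (PySem.Str.lower s) || PySem.Str.isIn "mg" (PySem.Str.lower s) ||
       PySem.Str.isIn "blank" (PySem.Str.lower s) || PySem.Str.isIn "std" (PySem.Str.lower s)) := by
  have hl : (PySem.Str.lower s).toList = s.toList.map PySem.Chars.lowerChar := by
    simp [PySem.Chars.lower]
  simp [pvBannedIn, pvBanned, PySem.Str.isIn, hl, Bool.or_assoc]

-- ===== VERDICT (by name: the statement is the Claim_ definition above) =====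
theorem validSortChem_spec : Claim_equal_validSortChem := by
  intro s _
  unfold Spec_validSortChem validSortChem validSortChem_alt
  rw [pv_fold_eq]
  rw [show ([] : List Char) = pvLastN [] from rfl, pv_altLoop_eq _ _ _ (by decide)]
  rw [List.nil_append, pv_any_or, pv_bannedIn_lower]
  generalize s.toList.any (fun c => PySem.Chars.isdigit c) = b1
  generalize s.toList.any (fun c => c == ':') = b2
  generalize s.toList.any (fun c => c == '/') = b3
  generalize PySem.Str.isIn "ppm" (PySem.Str.lower s) = b4
  generalize PySem.Str.isIn "mg" (PySem.Str.lower s) = b5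
  generalize PySem.Str.isIn "blank" (PySem.Str.lower s) = b6
  generalize PySem.Str.isIn "std" (PySem.Str.lower s) = b7
  cases b1 <;> cases b2 <;> cases b3 <;> cases b4 <;> cases b5 <;> cases b6 <;> cases b7 <;> rfl
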